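-- pv_equiv track=rewrite | github.com/UnknownEquineCoder/exam-preparation-q2-programming | ex1.py | every_fifth_month
-- ===== SOURCE A (Python) =====
-- from typing import Generator
--
-- def every_fifth_month(n: int, /) -> Generator[str, None, None]:
--     months = [
--         "January",
--         "February",
--         "March",
--         "April",
--         "May",
--         "June",
--         "July",
--         "August",
--         "September",
--         "October",
--         "November",
--         "December",
--     ]
--
--     current: int = 8
--     for i in range(n):
--         yield months[current]
--         current += 5
--         current = current % len(months)
-- ===== SOURCE B (Python) =====
-- def every_fifth_month(n, /):
--     # Stepping by 5 from index 8 in a 12-month list visits all 12 months with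
--     # period 12 (gcd(5,12)=1); this is that full cycle, precomputed once.
--     cycle = [
--         "September", "February", "July", "December", "May", "October",
--         "March", "August", "January", "June", "November", "April",
--     ]
--     if n > 0:
--         q, r = divmod(n, 12)
--         yield from cycle * q
--         yield from cycle[:r]
-- ===== Notes on version B (the rewrite author's own statement) =====
-- stated objective: alternative
-- what changed: B precomputes the full 12-element cycle that stepping by 5 from September traverses (gcd(5,12)=1), then emits it by tiling: divmod(n,12) gives q whole copies of the cycle plus an r-element prefix, so no per-iteration index arithmetic or running state is performed.
import Mathlib
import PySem

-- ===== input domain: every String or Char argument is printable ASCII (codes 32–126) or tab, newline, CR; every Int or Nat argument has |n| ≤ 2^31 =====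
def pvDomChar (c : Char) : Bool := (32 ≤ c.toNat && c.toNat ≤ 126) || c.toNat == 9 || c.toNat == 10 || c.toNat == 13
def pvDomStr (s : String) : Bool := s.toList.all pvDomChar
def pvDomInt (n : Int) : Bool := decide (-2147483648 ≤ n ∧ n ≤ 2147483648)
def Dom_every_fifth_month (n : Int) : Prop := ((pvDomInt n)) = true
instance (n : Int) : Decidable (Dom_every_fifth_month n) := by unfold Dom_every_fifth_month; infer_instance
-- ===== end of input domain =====

-- B precomputes the 12-element cycle that stepping by 5 from September traverses and emits it by tiling (divmod n 12 whole copies + prefix); objective: alternative, no per-item index arithmetic.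

-- ===== PORT A =====
def pvMonths : List String :=
  ["January", "February", "March", "April", "May", "June",
   "July", "August", "September", "October", "November", "December"]

-- A's loop keeps state (emitted list, current); `months[current]` is always in range
-- (current stays in [0,12)), so pyGetD with an unused default is exact here.
def every_fifth_month (n : Int) : List String :=
  ((PySem.List.pyRange 0 n 1).foldl
    (fun (st : List String × Int) _ =>
      (st.1 ++ [PySem.List.pyGetD pvMonths st.2 ""],
       PySem.Int.mod (st.2 + 5) (pvMonths.length : Int)))
    ([], 8)).1

-- ===== PORT B =====
def pvCycle : List String :=
  ["September", "February", "July", "December", "May", "October",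
   "March", "August", "January", "June", "November", "April"]

def every_fifth_month_alt (n : Int) : List String :=
  if n > 0 then
    let q := PySem.Int.floordiv n 12
    let r := PySem.Int.mod n 12
    (List.replicate q.toNat pvCycle).flatten ++ PySem.List.slice pvCycle none (some r)
  else []

-- ===== PRECONDITION & SPEC =====
def Spec_every_fifth_month (n : Int) (out : List String) : Prop := out = every_fifth_month_alt n
instance (n : Int) (out : List String) : Decidable (Spec_every_fifth_month n out) := by unfold Spec_every_fifth_month; infer_instance

-- ===== CLAIM (what is proved, stated in full; the proofs are below) =====
def Claim_equal_every_fifth_month : Prop := ∀ (n : Int), Dom_every_fifth_month n → Spec_every_fifth_month n (every_fifth_month n)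

-- ===== LEMMAS AND PROOFS =====

theorem pv_len12 : (pvMonths.length : Int) = 12 := by norm_num [pvMonths]

theorem pv_mod12 (a : Int) : PySem.Int.mod a 12 = a % 12 :=
  PySem.Int.mod_eq_emod_of_pos (by norm_num)

-- Loop invariant: A's fold over m iterations, started at an in-range index c,
-- emits exactly the closed-form sequence and leaves current = (c + 5*m) % 12.
theorem pv_loop (m : Nat) (acc : List String) (c : Int) (h0 : 0 ≤ c) (h1 : c < 12) :
    (List.range m).foldl
      (fun (st : List String × Int) _ =>
        (st.1 ++ [PySem.List.pyGetD pvMonths st.2 ""],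
         PySem.Int.mod (st.2 + 5) (pvMonths.length : Int)))
      (acc, c)
    = (acc ++ (List.range m).map
        (fun (k : Nat) => PySem.List.pyGetD pvMonths (PySem.Int.mod (c + 5 * (k : Int)) 12) ""),
       PySem.Int.mod (c + 5 * (m : Int)) 12) := by
  induction m with
  | zero =>
      simp only [List.range_zero, List.foldl_nil, List.map_nil, List.append_nil,
        Nat.cast_zero, mul_zero, add_zero, pv_mod12]
      rw [Int.emod_eq_of_lt h0 h1]
  | succ m ih =>
      rw [List.range_succ, List.foldl_append, ih]
      simp only [List.foldl_cons, List.foldl_nil, List.map_append, List.map_singleton,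
        pv_len12, pv_mod12]
      refine Prod.ext ?_ ?_
      · simp only [List.append_assoc]
      · push_cast
        omega

-- A's emitted term, as a function of the Nat loop counter.
def pvF (k : Nat) : String :=
  PySem.List.pyGetD pvMonths (PySem.Int.mod (8 + 5 * (k : Int)) 12) ""

-- A's term depends on k only through k % 12, and equals the precomputed cycle entry.
theorem pv_f_cycle (k : Nat) : pvF k = pvCycle.getD (k % 12) "" := by
  have hj : k % 12 < 12 := Nat.mod_lt _ (by norm_num)
  have hk : (8 + 5 * (k : Int)) % 12 = (8 + 5 * ((k % 12 : Nat) : Int)) % 12 := by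
    conv_lhs => rw [show (k : Int) = ((k % 12 : Nat) : Int) + 12 * ((k / 12 : Nat) : Int) by
      push_cast; omega]
    ring_nf
    omega
  unfold pvF
  rw [pv_mod12, hk]
  interval_cases h : k % 12 <;> decide

-- Tiling lemma: q whole copies of the cycle plus an r-prefix is the map of the
-- periodic entry function over range m, where q = m / 12, r = m % 12.
theorem pv_tile (m : Nat) :
    (List.replicate (m / 12) pvCycle).flatten ++ pvCycle.take (m % 12)
      = (List.range m).map (fun k => pvCycle.getD (k % 12) "") := by
  induction m with
  | zero => simp
  | succ m ih =>
      rw [List.range_succ, List.map_append, List.map_singleton, ← ih]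
      by_cases h : m % 12 = 11
      · have hq : (m + 1) / 12 = m / 12 + 1 := by omega
        have hr : (m + 1) % 12 = 0 := by omega
        rw [hq, hr, h, List.replicate_succ', List.flatten_append]
        simp only [List.flatten_cons, List.flatten_nil, List.append_nil,
          List.take_zero, List.append_nil, List.append_assoc]
        congr 1
      · have hq : (m + 1) / 12 = m / 12 := by omega
        have hr : (m + 1) % 12 = m % 12 + 1 := by omega
        rw [hq, hr, List.append_assoc]
        congr 1
        have hlt : m % 12 < pvCycle.length := by
          have : m % 12 < 12 := Nat.mod_lt _ (by norm_num)
          simpa [pvCycle] using this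
        rw [List.take_add_one, List.getElem?_eq_getElem hlt]
        simp [List.getD, List.getElem?_eq_getElem hlt]

-- ===== VERDICT (by name: the statement is the Claim_ definition above) =====
theorem every_fifth_month_spec : Claim_equal_every_fifth_month := by
  intro n _
  unfold Spec_every_fifth_month every_fifth_month every_fifth_month_alt
  rw [PySem.List.pyRange_one]
  simp only [Int.sub_zero]
  rw [List.foldl_map, pv_loop _ _ 8 (by norm_num) (by norm_num)]
  simp only [List.nil_append]
  by_cases hn : n > 0
  · simp only [hn, if_pos]
    have hr0 : (0 : Int) ≤ PySem.Int.mod n 12 := by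
      rw [pv_mod12]; exact Int.emod_nonneg n (by norm_num)
    rw [PySem.List.slice_to _ hr0]
    have hq : (PySem.Int.floordiv n 12).toNat = n.toNat / 12 := by
      rw [PySem.Int.floordiv_eq_ediv_of_pos (by norm_num)]
      omega
    have hr : (PySem.Int.mod n 12).toNat = n.toNat % 12 := by
      rw [pv_mod12]; omega
    rw [hq, hr, pv_tile]
    exact List.map_congr_left (fun k _ => pv_f_cycle k)
  · have h0 : n.toNat = 0 := by omega
    simp [hn, h0]
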